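-- pv_equiv track=rewrite | github.com/val3riot/ComputerScience | AlgoritmiStruttureDati/esercizi_DFS.py | find_last_zero_faster
-- ===== SOURCE A (Python) =====
-- def flz(A,i,j):
--     m =  int((i+j)/2)
--     if (A[m] == 0 and A[m+1]==1):
--         return m
--     elif A[m]==0:
--         return flz(A,m+1,j)
--     else:
--         return flz(A,i,m-1)
--
-- def find_last_zero_faster(A):
--     n = len(A)-1
--     if n==0:
--         return -1
--     if A[n]==0:
--         return n
--     i=0
--     while not (A[pow(2,i)] == 0 and A[pow(2,i+1)] ==1):
--         i+=1
--     return flz(A,pow(2,i),pow(2,i+1)+1)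
-- ===== SOURCE B (Python) =====
-- def find_last_zero_faster(A):
--     n = len(A) - 1
--     if n == 0:
--         return -1
--     if A[n] == 0:
--         return n
--     # exponential search: double p until A[p..2p] brackets the 0 -> 1 boundary
--     p = 1
--     while not (A[p] == 0 and A[2 * p] == 1):
--         p *= 2
--     # iterative binary search for the first 1 in [p, 2p]; the last zero is just before it
--     lo, hi = p, 2 * p
--     while lo < hi:
--         m = (lo + hi) // 2
--         if A[m] == 0:
--             lo = m + 1
--         else:
--             hi = m
--     return lo - 1
-- ===== Notes on version B (the rewrite author's own statement) =====
-- stated objective: alternative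
-- what changed: Replaces A's exponent-counter gallop (recomputing pow(2,i) each round) with a doubling bound p, and replaces the recursive three-way helper flz over the widened bracket [2^i, 2^(i+1)+1) with an inline iterative two-way binary search for the first 1 in [p, 2p], returning the index before it; no recursion and no helper function remain.
-- outside the precondition, e.g. on find_last_zero_faster([1, 0, 1]): A returns 1, B returns 1; on find_last_zero_faster([5, 1, 5, 5, 1, 1, -1, 0, 0, 1, 0, 2, -1, 0, -1, 1, 1]): A returns 8, B returns 10
import Mathlib
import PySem

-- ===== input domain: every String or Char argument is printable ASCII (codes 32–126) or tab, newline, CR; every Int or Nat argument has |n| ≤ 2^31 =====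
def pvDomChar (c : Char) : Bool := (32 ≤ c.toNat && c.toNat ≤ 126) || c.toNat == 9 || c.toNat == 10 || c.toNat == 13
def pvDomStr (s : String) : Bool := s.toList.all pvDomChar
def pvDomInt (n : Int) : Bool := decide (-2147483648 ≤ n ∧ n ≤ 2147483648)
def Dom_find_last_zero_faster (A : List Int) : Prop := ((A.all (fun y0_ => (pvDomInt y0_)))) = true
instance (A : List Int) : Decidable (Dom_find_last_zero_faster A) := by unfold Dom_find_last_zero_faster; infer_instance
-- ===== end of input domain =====

-- B replaces A's exponent-counter gallop + recursive three-way bracket search by a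
-- doubling bound + an inline iterative two-way binary search (objective: alternative).

-- ===== PORT A =====
-- flz(A,i,j): fuel-indexed transliteration; fuel 0 / IndexError return the junk
-- value -2, which is never reached on inputs satisfying Pre_ (Python raises there).
-- int((i+j)/2) is truncating division, exact on the in-range ints of Dom: Int.tdiv.
def pvFlz (A : List Int) : Nat → Int → Int → Int
  | 0, _, _ => -2
  | f+1, i, j =>
    let m := Int.tdiv (i + j) 2
    match PySem.List.pyGet? A m with
    | none => -2
    | some am =>
      if am = 0 then
        match PySem.List.pyGet? A (m + 1) with
        | none => -2
        | some am1 => if am1 = 1 then m else pvFlz A f (m + 1) j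
      else pvFlz A f i (m - 1)

-- the 'while not (A[2^i]==0 and A[2^(i+1)]==1): i+=1' loop (short-circuit kept);
-- none = IndexError or fuel exhausted (Python raises there; outside Pre_)
def pvGallop (A : List Int) : Nat → Nat → Option Nat
  | 0, _ => none
  | f+1, i =>
    match PySem.List.pyGet? A ((2:Int) ^ i) with
    | none => none
    | some a =>
      if a = 0 then
        match PySem.List.pyGet? A ((2:Int) ^ (i+1)) with
        | none => none
        | some b => if b = 1 then some i else pvGallop A f (i+1)
      else pvGallop A f (i+1)

def find_last_zero_faster (A : List Int) : Int :=
  let n : Int := (A.length : Int) - 1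
  if n = 0 then -1
  else
    match PySem.List.pyGet? A n with
    | none => -2
    | some an =>
      if an = 0 then n
      else
        match pvGallop A (A.length + 2) 0 with
        | none => -2
        | some i => pvFlz A (A.length + 2) ((2:Int) ^ i) ((2:Int) ^ (i+1) + 1)

-- ===== PORT B =====
-- the 'while not (A[p]==0 and A[2*p]==1): p *= 2' loop (short-circuit kept);
-- none = IndexError or fuel exhausted (Python raises there; outside Pre_)
def pvBExp (A : List Int) : Nat → Int → Option Int
  | 0, _ => none
  | f+1, p =>
    match PySem.List.pyGet? A p with
    | none => none
    | some a =>
      if a = 0 then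
        match PySem.List.pyGet? A (2 * p) with
        | none => none
        | some b => if b = 1 then some p else pvBExp A f (2 * p)
      else pvBExp A f (2 * p)

-- iterative binary search for the first 1 in [lo, hi]; fuel A.length+2 suffices
-- since the interval strictly shrinks (fuel 0 / IndexError junk -2 unreachable on Pre_)
def pvBsearch (A : List Int) : Nat → Int → Int → Int
  | 0, _, _ => -2
  | f+1, lo, hi =>
    if lo < hi then
      let m := PySem.Int.floordiv (lo + hi) 2
      match PySem.List.pyGet? A m with
      | none => -2
      | some am => if am = 0 then pvBsearch A f (m + 1) hi else pvBsearch A f lo m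
    else lo - 1

def find_last_zero_faster_alt (A : List Int) : Int :=
  let n : Int := (A.length : Int) - 1
  if n = 0 then -1
  else
    match PySem.List.pyGet? A n with
    | none => -2
    | some an =>
      if an = 0 then n
      else
        match pvBExp A (A.length + 2) 1 with
        | none => -2
        | some p => pvBsearch A (A.length + 2) p (2 * p)

-- ===== PRECONDITION & SPEC =====
-- Pre_ excludes: the empty list (A raises IndexError); and, when the last element
-- is nonzero and the list is longer than 1, every list that is not a sorted 0/1
-- array with at least two zeros whose gallop indices stay in range — outside that
-- shape A either raises IndexError (so must be excluded) or, on unsorted/non-binary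
-- lists where the gallop accidentally succeeds, returns an artefact of the gallop
-- (B's value there usually coincides but can differ; no equality is claimed).
def Pre_find_last_zero_faster (A : List Int) : Prop :=
  A ≠ [] ∧
  (A.length = 1 ∨ PySem.List.pyGet? A ((A.length : Int) - 1) = some 0 ∨
    (2 ≤ A.count 0 ∧ A.count 0 < A.length ∧
      A = List.replicate (A.count 0) 0 ++ List.replicate (A.length - A.count 0) 1 ∧
      2 ^ (Nat.log2 (A.count 0 - 1) + 1) ≤ A.length - 1))
instance (A : List Int) : Decidable (Pre_find_last_zero_faster A) := by
  unfold Pre_find_last_zero_faster; infer_instance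
def pvWitness_find_last_zero_faster : List Int := [0, 0, 1, 1]

def Spec_find_last_zero_faster (A : List Int) (out : Int) : Prop :=
  out = find_last_zero_faster_alt A
instance (A : List Int) (out : Int) : Decidable (Spec_find_last_zero_faster A out) := by
  unfold Spec_find_last_zero_faster; infer_instance

-- ===== CLAIM (what is proved, stated in full; the proofs are below) =====
def Claim_equal_find_last_zero_faster : Prop := ∀ (A : List Int), Dom_find_last_zero_faster A → Pre_find_last_zero_faster A → Spec_find_last_zero_faster A (find_last_zero_faster A)

-- ===== LEMMAS AND PROOFS =====

-- value at a nonnegative in-range index of the sorted 0/1 shape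
lemma pvGetShape (z w k : Nat) (hk : k < z + w) :
    PySem.List.pyGet? (List.replicate z (0:Int) ++ List.replicate w 1) (k : Int)
      = some (if k < z then (0:Int) else 1) := by
  rw [PySem.List.pyGet?_natCast]
  by_cases h : k < z
  · rw [List.getElem?_append_left (by simpa using h)]
    simp [h]
  · rw [List.getElem?_append_right (by simpa using h)]
    simp only [List.length_replicate, List.getElem?_replicate]
    rw [if_pos (by omega), if_neg h]

lemma pvGetShapeI (z w : Nat) (m : Int) (h0 : 0 ≤ m) (hm : m < (z:Int) + w) :
    PySem.List.pyGet? (List.replicate z (0:Int) ++ List.replicate w 1) m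
      = some (if m < (z:Int) then (0:Int) else 1) := by
  have hmk : m = ((m.toNat : Nat) : Int) := (Int.toNat_of_nonneg h0).symm
  rw [hmk, pvGetShape z w m.toNat (by omega)]
  by_cases h : m.toNat < z
  · rw [if_pos h, if_pos (by omega)]
  · rw [if_neg h, if_neg (by omega)]

lemma pvFlz_eq (z w : Nat) (hz : 2 ≤ z) (hw : 1 ≤ w) :
    ∀ (f : Nat) (i j : Int), 0 ≤ i → i ≤ (z:Int) - 1 → (z:Int) - 1 ≤ j → j ≤ (z:Int) + w →
      (j - i).toNat < f →
      pvFlz (List.replicate z (0:Int) ++ List.replicate w 1) f i j = (z:Int) - 1 := by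
  intro f
  induction f with
  | zero => intro i j _ _ _ _ h; omega
  | succ f ih =>
    intro i j h0 hiz hzj hjw hf
    have hm : Int.tdiv (i + j) 2 = (i + j) / 2 :=
      Int.tdiv_eq_ediv_of_nonneg (by omega)
    simp only [pvFlz, hm]
    set m : Int := (i + j) / 2 with hmdef
    have hmlo : i ≤ m := by omega
    have hmhi : m ≤ j := by omega
    have hmrange : m < (z:Int) + w := by omega
    rw [pvGetShapeI z w m (by omega) hmrange]
    by_cases hmz : m < (z:Int)
    · rw [if_pos hmz]
      simp only [reduceIte]
      rw [pvGetShapeI z w (m + 1) (by omega) (by omega)]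
      by_cases hm1 : m + 1 < (z:Int)
      · -- A[m+1] = 0 ≠ 1 : recurse on (m+1, j)
        rw [if_pos hm1]
        dsimp only
        rw [if_neg (by decide : ¬ (0:Int) = 1)]
        exact ih (m + 1) j (by omega) (by omega) hzj hjw (by omega)
      · -- m = z-1 : found
        rw [if_neg hm1]
        dsimp only
        rw [if_pos (rfl : (1:Int) = 1)]
        omega
    · -- A[m] = 1 : recurse on (i, m-1)
      rw [if_neg hmz]
      dsimp only
      rw [if_neg (by decide : ¬ (1:Int) = 0)]
      exact ih i (m - 1) h0 hiz (by omega) (by omega) (by omega)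

lemma pvGallop_eq (z w : Nat) (hz : 2 ≤ z) (_hw : 1 ≤ w)
    (hgl : 2 ^ (Nat.log2 (z - 1) + 1) ≤ z + w - 1) :
    ∀ (f i : Nat), i ≤ Nat.log2 (z - 1) → Nat.log2 (z - 1) - i < f →
      pvGallop (List.replicate z (0:Int) ++ List.replicate w 1) f i
        = some (Nat.log2 (z - 1)) := by
  have hlog1 : 2 ^ Nat.log2 (z - 1) ≤ z - 1 := Nat.log2_self_le (by omega)
  have hlog2 : z - 1 < 2 ^ (Nat.log2 (z - 1) + 1) := Nat.lt_log2_self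
  intro f
  induction f with
  | zero => intro i _ h; omega
  | succ f ih =>
    intro i hi hf
    have hpowi : 2 ^ i ≤ 2 ^ Nat.log2 (z - 1) := Nat.pow_le_pow_right (by omega) hi
    have hc1 : ((2:Int) ^ i) = ((2 ^ i : Nat) : Int) := by push_cast; ring
    have hc2 : ((2:Int) ^ (i+1)) = ((2 ^ (i+1) : Nat) : Int) := by push_cast; ring
    simp only [pvGallop, hc1, hc2]
    rw [pvGetShape z w (2 ^ i) (by omega)]
    rw [if_pos (by omega)]
    dsimp only
    rw [if_pos (rfl : (0:Int) = 0)]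
    have hp1 : 2 ^ (i + 1) ≤ 2 ^ (Nat.log2 (z - 1) + 1) :=
      Nat.pow_le_pow_right (by omega) (by omega)
    rw [pvGetShape z w (2 ^ (i+1)) (by omega)]
    by_cases hlast : i = Nat.log2 (z - 1)
    · subst hlast
      rw [if_neg (by omega)]
      dsimp only
      rw [if_pos (rfl : (1:Int) = 1)]
    · have hi' : i < Nat.log2 (z - 1) := by omega
      have : 2 ^ (i + 1) ≤ 2 ^ Nat.log2 (z - 1) := Nat.pow_le_pow_right (by omega) (by omega)
      rw [if_pos (by omega)]
      dsimp only
      rw [if_neg (by decide : ¬ (0:Int) = 1)]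
      exact ih (i + 1) (by omega) (by omega)

lemma pvBsearch_eq (z w : Nat) (_hw : 1 ≤ w) :
    ∀ (f : Nat) (lo hi : Int), 0 ≤ lo → lo ≤ (z:Int) → (z:Int) ≤ hi → hi ≤ (z:Int) + w - 1 →
      (hi - lo).toNat < f →
      pvBsearch (List.replicate z (0:Int) ++ List.replicate w 1) f lo hi = (z:Int) - 1 := by
  intro f
  induction f with
  | zero => intro lo hi _ _ _ _ h; omega
  | succ f ih =>
    intro lo hi h0 hloz hzhi hhi hf
    simp only [pvBsearch]
    by_cases hlt : lo < hi
    · rw [if_pos hlt]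
      have hmd : PySem.Int.floordiv (lo + hi) 2 = (lo + hi) / 2 :=
        PySem.Int.floordiv_eq_ediv_of_pos (by omega)
      simp only [hmd]
      set m : Int := (lo + hi) / 2 with hmdef
      have hmlo : lo ≤ m := by omega
      have hmhi : m < hi := by omega
      rw [pvGetShapeI z w m (by omega) (by omega)]
      by_cases hmz : m < (z:Int)
      · rw [if_pos hmz]
        dsimp only
        rw [if_pos (rfl : (0:Int) = 0)]
        exact ih (m + 1) hi (by omega) (by omega) hzhi hhi (by omega)
      · rw [if_neg hmz]
        dsimp only
        rw [if_neg (by decide : ¬ (1:Int) = 0)]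
        exact ih lo m h0 hloz (by omega) (by omega) (by omega)
    · rw [if_neg hlt]
      omega

-- B's exponential phase: starting from p = 2^i it stops at p = 2^(log2 (z-1))
lemma pvBExp_eq (z w : Nat) (hz : 2 ≤ z) (hw : 1 ≤ w)
    (hgl : 2 ^ (Nat.log2 (z - 1) + 1) ≤ z + w - 1) :
    ∀ (f i : Nat) (p : Int), p = ((2 ^ i : Nat) : Int) → i ≤ Nat.log2 (z - 1) →
      Nat.log2 (z - 1) - i < f →
      pvBExp (List.replicate z (0:Int) ++ List.replicate w 1) f p
        = some ((2 ^ Nat.log2 (z - 1) : Nat) : Int) := by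
  have hlog1 : 2 ^ Nat.log2 (z - 1) ≤ z - 1 := Nat.log2_self_le (by omega)
  have hlog2 : z - 1 < 2 ^ (Nat.log2 (z - 1) + 1) := Nat.lt_log2_self
  intro f
  induction f with
  | zero => intro i p _ _ h; omega
  | succ f ih =>
    intro i p hp hi hf
    subst hp
    have hpowi : 2 ^ i ≤ 2 ^ Nat.log2 (z - 1) := Nat.pow_le_pow_right (by omega) hi
    have hc2 : 2 * ((2 ^ i : Nat) : Int) = ((2 ^ (i+1) : Nat) : Int) := by push_cast; ring
    simp only [pvBExp, hc2]
    rw [pvGetShape z w (2 ^ i) (by omega)]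
    rw [if_pos (by omega)]
    dsimp only
    rw [if_pos (rfl : (0:Int) = 0)]
    have hp1 : 2 ^ (i + 1) ≤ 2 ^ (Nat.log2 (z - 1) + 1) :=
      Nat.pow_le_pow_right (by omega) (by omega)
    rw [pvGetShape z w (2 ^ (i+1)) (by omega)]
    by_cases hlast : i = Nat.log2 (z - 1)
    · subst hlast
      rw [if_neg (by omega)]
      dsimp only
      rw [if_pos (rfl : (1:Int) = 1)]
    · have hi' : i < Nat.log2 (z - 1) := by omega
      have : 2 ^ (i + 1) ≤ 2 ^ Nat.log2 (z - 1) := Nat.pow_le_pow_right (by omega) (by omega)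
      rw [if_pos (by omega)]
      dsimp only
      rw [if_neg (by decide : ¬ (0:Int) = 1)]
      exact ih (i + 1) _ rfl (by omega) (by omega)

-- the sorted-0/1 branch: both ports return z - 1
lemma pvBranch3 (z w : Nat) (hz : 2 ≤ z) (hw : 1 ≤ w)
    (hgl : 2 ^ (Nat.log2 (z - 1) + 1) ≤ z + w - 1) :
    find_last_zero_faster (List.replicate z (0:Int) ++ List.replicate w 1)
      = find_last_zero_faster_alt (List.replicate z (0:Int) ++ List.replicate w 1) := by
  have hlen : (List.replicate z (0:Int) ++ List.replicate w 1).length = z + w := by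
    simp
  have hlog1 : 2 ^ Nat.log2 (z - 1) ≤ z - 1 := Nat.log2_self_le (by omega)
  have hlog2 : z - 1 < 2 ^ (Nat.log2 (z - 1) + 1) := Nat.lt_log2_self
  have hlt : Nat.log2 (z - 1) < 2 ^ Nat.log2 (z - 1) := Nat.lt_two_pow_self
  have hlast : PySem.List.pyGet? (List.replicate z (0:Int) ++ List.replicate w 1)
      (((z + w - 1 : Nat)) : Int) = some 1 := by
    rw [pvGetShape z w (z + w - 1) (by omega), if_neg (by omega)]
  unfold find_last_zero_faster find_last_zero_faster_alt
  simp only [hlen]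
  rw [show ((z + w : Nat) : Int) - 1 = (((z + w - 1 : Nat)) : Int) by omega, hlast]
  rw [if_neg (by omega : ¬ (((z + w - 1 : Nat)) : Int) = 0),
    if_neg (by omega : ¬ (((z + w - 1 : Nat)) : Int) = 0)]
  dsimp only
  simp only [if_neg (by decide : ¬ (1:Int) = 0)]
  rw [pvGallop_eq z w hz hw hgl (z + w + 2) 0 (by omega) (by omega)]
  rw [pvBExp_eq z w hz hw hgl (z + w + 2) 0 1 (by norm_num) (by omega) (by omega)]
  dsimp only
  -- A's side: flz over [2^i*, 2^(i*+1)+1)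
  have hA := pvFlz_eq z w hz hw (z + w + 2)
    ((2:Int) ^ Nat.log2 (z - 1)) ((2:Int) ^ (Nat.log2 (z - 1) + 1) + 1)
  have hc1 : ((2:Int) ^ Nat.log2 (z - 1)) = ((2 ^ Nat.log2 (z - 1) : Nat) : Int) := by
    push_cast; ring
  have hc2 : ((2:Int) ^ (Nat.log2 (z - 1) + 1)) = ((2 ^ (Nat.log2 (z - 1) + 1) : Nat) : Int) := by
    push_cast; ring
  rw [hc1, hc2] at hA ⊢
  have e1 : (0:Int) ≤ ((2 ^ Nat.log2 (z - 1) : Nat) : Int) := by omega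
  have e2 : ((2 ^ Nat.log2 (z - 1) : Nat) : Int) ≤ (z:Int) - 1 := by omega
  have e3 : (z:Int) - 1 ≤ ((2 ^ (Nat.log2 (z - 1) + 1) : Nat) : Int) + 1 := by omega
  have e4 : ((2 ^ (Nat.log2 (z - 1) + 1) : Nat) : Int) + 1 ≤ (z:Int) + w := by omega
  have e5 : (((2 ^ (Nat.log2 (z - 1) + 1) : Nat) : Int) + 1
      - ((2 ^ Nat.log2 (z - 1) : Nat) : Int)).toNat < z + w + 2 := by omega
  rw [hA e1 e2 e3 e4 e5]
  -- B's side: binary search over [2^i*, 2 * 2^i*]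
  have hc3 : 2 * ((2 ^ Nat.log2 (z - 1) : Nat) : Int)
      = ((2 ^ (Nat.log2 (z - 1) + 1) : Nat) : Int) := by push_cast; ring
  rw [hc3]
  rw [pvBsearch_eq z w hw (z + w + 2) ((2 ^ Nat.log2 (z - 1) : Nat) : Int)
    ((2 ^ (Nat.log2 (z - 1) + 1) : Nat) : Int) (by omega) (by omega) (by omega)
    (by omega) (by omega)]

-- ===== VERDICT (by name: the statement is the Claim_ definition above) =====
theorem find_last_zero_faster_spec : Claim_equal_find_last_zero_faster := by
  intro A _hDom hPre
  unfold Spec_find_last_zero_faster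
  obtain ⟨hne, hcase⟩ := hPre
  rcases hcase with h1 | h2 | h3
  · -- length 1: both hit the n == 0 guard and return -1
    obtain ⟨a, rfl⟩ : ∃ a, A = [a] := by
      match A, h1 with
      | [a], _ => exact ⟨a, rfl⟩
    unfold find_last_zero_faster find_last_zero_faster_alt
    simp
  · -- last element is 0: both return n
    by_cases h1 : A.length = 1
    · obtain ⟨a, rfl⟩ : ∃ a, A = [a] := by
        match A, h1 with
        | [a], _ => exact ⟨a, rfl⟩
      unfold find_last_zero_faster find_last_zero_faster_alt
      simp
    · have h2' : (2:Nat) ≤ A.length := by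
        rcases A with _ | ⟨a, t⟩
        · exact absurd rfl hne
        · simp only [List.length_cons] at h1 ⊢
          omega
      unfold find_last_zero_faster find_last_zero_faster_alt
      simp only [h2]
      rw [if_neg (show ¬ ((A.length : Int) - 1 = 0) by omega),
        if_neg (show ¬ ((A.length : Int) - 1 = 0) by omega)]
      simp
  · -- sorted 0/1 array: both return (count of zeros) - 1
    obtain ⟨hz2, hzlt, hA, hgl⟩ := h3
    have hw : 1 ≤ A.length - A.count 0 := by omega
    have hzw : A.count 0 + (A.length - A.count 0) = A.length := by omega
    rw [hA]
    exact pvBranch3 (A.count 0) (A.length - A.count 0) hz2 hw (by omega)
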